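-- pv_equiv track=rewrite | github.com/Harikrishnan200/LEETCODE-PROBLEMS | Mitsogo-MoneyExchange.py | minNotes
-- ===== SOURCE A (Python) =====
-- def minNotes(denominations, target):
--     notes = []
--     i = len(denominations) - 1
--     while i >= 0:
--         while target >= denominations[i]:
--             target -= denominations[i]
--             notes.append(denominations[i])
--         i -= 1
--     return notes
-- ===== SOURCE B (Python) =====
-- def minNotes(denominations, target):
--     notes = []
--     for d in reversed(denominations):
--         if d > 0 and target >= d:
--             q = target // d
--             notes.extend([d] * q)
--             target -= q * d
--     return notes
-- ===== Notes on version B (the rewrite author's own statement) =====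
-- stated objective: alternative
-- what changed: Replaces the index-driven while-loop with repeated subtraction (one append per note) by a single reversed for-loop that computes each note count in closed form with floor division and extends the list at once.
import Mathlib
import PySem

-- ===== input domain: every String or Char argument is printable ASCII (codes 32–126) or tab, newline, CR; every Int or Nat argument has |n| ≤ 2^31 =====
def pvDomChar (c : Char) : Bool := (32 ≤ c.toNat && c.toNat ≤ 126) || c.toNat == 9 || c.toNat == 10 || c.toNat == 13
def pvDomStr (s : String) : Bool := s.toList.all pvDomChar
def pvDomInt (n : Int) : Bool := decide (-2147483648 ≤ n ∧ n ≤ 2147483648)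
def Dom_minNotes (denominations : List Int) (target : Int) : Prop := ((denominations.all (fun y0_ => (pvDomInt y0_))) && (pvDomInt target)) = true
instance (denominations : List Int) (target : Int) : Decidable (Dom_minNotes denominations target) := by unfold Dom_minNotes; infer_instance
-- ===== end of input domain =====

-- ===== PORT A =====
-- B changes the algorithm: closed-form floor division per denomination instead of
-- A's repeated subtraction (same result, different structure).
-- Inner while-loop of A: repeated subtraction. The extra `0 < d` in the guard only
-- makes the recursion total; inputs on which Python's inner loop diverges (target ≥ d ≤ 0)
-- are excluded by Pre_minNotes.
def minNotesInner (d : Int) (target : Int) (notes : List Int) : Int × List Int :=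
  if h : d ≤ target ∧ 0 < d then minNotesInner d (target - d) (notes ++ [d]) else (target, notes)
termination_by target.toNat
decreasing_by
  have h1 := h.1; have h2 := h.2; omega

-- Outer while-loop of A: i from len-1 down to 0.
def minNotesOuter (dens : List Int) (i : Nat) (target : Int) (notes : List Int) : List Int :=
  match i with
  | 0 => notes
  | Nat.succ j =>
    let d := dens.getD j 0
    let r := minNotesInner d target notes
    minNotesOuter dens j r.1 r.2

def minNotes (denominations : List Int) (target : Int) : List Int :=
  minNotesOuter denominations denominations.length target []

-- ===== PORT B =====
def minNotesStep (st : Int × List Int) (d : Int) : Int × List Int :=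
  if 0 < d ∧ d ≤ st.1 then
    let q := PySem.Int.floordiv st.1 d
    (st.1 - q * d, st.2 ++ List.replicate q.toNat d)
  else st

def minNotes_alt (denominations : List Int) (target : Int) : List Int :=
  (denominations.reverse.foldl minNotesStep (target, [])).2

-- ===== PRECONDITION & SPEC =====
-- Pre_ excludes exactly the inputs on which A's inner while-loop never terminates:
-- a non-positive denomination d with target ≥ d (Python A diverges there, returning nothing).
def Pre_minNotes (denominations : List Int) (target : Int) : Prop :=
  ∀ d ∈ denominations, 0 < d ∨ target < d
instance (denominations : List Int) (target : Int) : Decidable (Pre_minNotes denominations target) := by unfold Pre_minNotes; infer_instance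

def pvWitness_minNotes : List Int × Int := ([1, 5, 10, 50], 137)

def Spec_minNotes (denominations : List Int) (target : Int) (out : List Int) : Prop := out = minNotes_alt denominations target
instance (denominations : List Int) (target : Int) (out : List Int) : Decidable (Spec_minNotes denominations target out) := by unfold Spec_minNotes; infer_instance

-- ===== CLAIM (what is proved, stated in full; the proofs are below) =====
def Claim_equal_minNotes : Prop := ∀ (denominations : List Int) (target : Int), Dom_minNotes denominations target → Pre_minNotes denominations target → Spec_minNotes denominations target (minNotes denominations target)

-- ===== LEMMAS AND PROOFS =====

theorem minNotesStep_fst_le (st : Int × List Int) (d : Int) : (minNotesStep st d).1 ≤ st.1 := by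
  unfold minNotesStep
  split_ifs with h
  · have hq : 1 ≤ PySem.Int.floordiv st.1 d := by
      rw [PySem.Int.le_floordiv_iff_mul_le h.1]; omega
    have hd := h.1
    nlinarith
  · exact le_rfl

-- The inner repeated-subtraction loop of A equals one closed-form step of B.
theorem minNotesInner_pos (d : Int) (hd : 0 < d) : ∀ (n : Nat) (target : Int),
    target.toNat ≤ n → ∀ notes, minNotesInner d target notes = minNotesStep (target, notes) d := by
  intro n
  induction n with
  | zero =>
    intro target hle notes
    rw [minNotesInner, minNotesStep]
    have : ¬ (d ≤ target ∧ 0 < d) := by omega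
    simp only [this, dite_false]
    have : ¬ (0 < d ∧ d ≤ target) := by omega
    simp [this]
  | succ n ih =>
    intro target hle notes
    by_cases hc : d ≤ target
    · rw [minNotesInner]
      simp only [show (d ≤ target ∧ 0 < d) from ⟨hc, hd⟩, dite_true, and_self]
      rw [ih (target - d) (by omega) (notes ++ [d])]
      -- now compare the two closed-form steps
      set q := PySem.Int.floordiv target d with hqdef
      have hq : q * d ≤ target ∧ target < (q + 1) * d :=
        (PySem.Int.floordiv_eq_iff_of_pos hd).mp hqdef.symm
      have hq1 : 1 ≤ q := by
        rw [hqdef, PySem.Int.le_floordiv_iff_mul_le hd]; omega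
      have hq' : PySem.Int.floordiv (target - d) d = q - 1 := by
        rw [PySem.Int.floordiv_eq_iff_of_pos hd]
        constructor <;> nlinarith [hq.1, hq.2]
      unfold minNotesStep
      by_cases hc2 : d ≤ target - d
      · simp only [show (0 < d ∧ d ≤ target - d) from ⟨hd, hc2⟩, if_true,
          show (0 < d ∧ d ≤ target) from ⟨hd, hc⟩, and_self, hq', ← hqdef]
        rw [Prod.mk.injEq]
        constructor
        · ring
        · have hrep : q.toNat = (q - 1).toNat + 1 := by omega
          rw [hrep, List.replicate_succ]
          simp
      · have h2 : ¬ (0 < d ∧ d ≤ target - d) := fun h => hc2 h.2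
        have hqe : q = 1 := by nlinarith [hq.1, hq.2]
        simp only [show (0 < d ∧ d ≤ target) from ⟨hd, hc⟩, and_self, if_true,
          ← hqdef, hqe]
        norm_num
        intro h'
        exact absurd h' hc2
    · rw [minNotesInner, minNotesStep]
      have h1 : ¬ (d ≤ target ∧ 0 < d) := by omega
      have h2 : ¬ (0 < d ∧ d ≤ target) := by omega
      simp [h1, h2]

theorem minNotesInner_eq (d target : Int) (notes : List Int) (hpre : 0 < d ∨ target < d) :
    minNotesInner d target notes = minNotesStep (target, notes) d := by
  rcases hpre with hd | ht
  · exact minNotesInner_pos d hd target.toNat target le_rfl notes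
  · rw [minNotesInner, minNotesStep]
    have h1 : ¬ (d ≤ target ∧ 0 < d) := by omega
    have h2 : ¬ (0 < d ∧ d ≤ target) := by omega
    simp [h1, h2]

theorem minNotesOuter_eq (dens : List Int) : ∀ (i : Nat), i ≤ dens.length →
    ∀ (target : Int) (notes : List Int),
    (∀ d ∈ dens.take i, 0 < d ∨ target < d) →
    minNotesOuter dens i target notes = ((dens.take i).reverse.foldl minNotesStep (target, notes)).2 := by
  intro i
  induction i with
  | zero => intro _ target notes _; simp [minNotesOuter]
  | succ j ih =>
    intro hlen target notes hpre
    have hj : j < dens.length := by omega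
    have htake : dens.take (j + 1) = dens.take j ++ [dens[j]] := by
      rw [List.take_add_one]; simp [List.getElem?_eq_getElem hj]
    have hmem : dens[j] ∈ dens.take (j + 1) := by
      rw [htake]; exact List.mem_append_right _ (List.mem_singleton_self _)
    rw [minNotesOuter]
    simp only [List.getD_eq_getElem?_getD, List.getElem?_eq_getElem hj, Option.getD_some]
    rw [minNotesInner_eq _ _ _ (hpre _ hmem)]
    rw [htake, List.reverse_append, List.reverse_singleton, List.singleton_append,
      List.foldl_cons]
    exact ih hj.le _ _ (fun d hd => by
      rcases hpre d (by rw [htake]; exact List.mem_append_left _ hd) with h | h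
      · exact Or.inl h
      · exact Or.inr (lt_of_le_of_lt (minNotesStep_fst_le (target, notes) dens[j]) h))

-- ===== VERDICT (by name: the statement is the Claim_ definition above) =====
theorem minNotes_spec : Claim_equal_minNotes := by
  intro dens target _ hpre
  unfold Spec_minNotes minNotes minNotes_alt
  have := minNotesOuter_eq dens dens.length le_rfl target [] (by simpa using hpre)
  simpa using this
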